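-- pv_equiv track=rewrite | github.com/axelvag/Python | 06-Parcours-Sequentiel/minListe_Partie2.py | trouveMin
-- ===== SOURCE A (Python) =====
-- def trouveMin(liste):
--     """
--     Fonction qui renvoie l'indice du minimum d'une liste.
--     Le paramètre d'entrée attendu est une liste de valeurs numériques réelles.
--     """
--     assert type(liste)==list, 'La variable envoyée à la fonction trouveMin doit être obligatoirement de type liste !'
--     assert (type(liste[0])==float or type(liste[0])==int), 'Les éléments de la liste doivent être des nombres réels !'
--     min=liste[0]
--     ind=0
--     for i in range (1,len(liste)):
--         assert (type(liste[i])==float or type(liste[i])==int), 'Les éléments de la liste doivent être des nombres réels !'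
--         if liste[i]<min:
--             min=liste[i]
--             ind=i
--     return ind
-- ===== SOURCE B (Python) =====
-- def trouveMin(liste):
--     """
--     Fonction qui renvoie l'indice du minimum d'une liste.
--     Le paramètre d'entrée attendu est une liste de valeurs numériques réelles.
--     """
--     assert type(liste)==list, 'La variable envoyée à la fonction trouveMin doit être obligatoirement de type liste !'
--     assert (type(liste[0])==float or type(liste[0])==int), 'Les éléments de la liste doivent être des nombres réels !'
--     for x in liste[1:]:
--         assert (type(x)==float or type(x)==int), 'Les éléments de la liste doivent être des nombres réels !'
--     return liste.index(min(liste))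
-- ===== Notes on version B (the rewrite author's own statement) =====
-- stated objective: idiomatic
-- what changed: Replaces the hand-rolled running-min/index tracking loop with the builtin min() followed by list.index() (validation loop kept for A's assertions).
import Mathlib
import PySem

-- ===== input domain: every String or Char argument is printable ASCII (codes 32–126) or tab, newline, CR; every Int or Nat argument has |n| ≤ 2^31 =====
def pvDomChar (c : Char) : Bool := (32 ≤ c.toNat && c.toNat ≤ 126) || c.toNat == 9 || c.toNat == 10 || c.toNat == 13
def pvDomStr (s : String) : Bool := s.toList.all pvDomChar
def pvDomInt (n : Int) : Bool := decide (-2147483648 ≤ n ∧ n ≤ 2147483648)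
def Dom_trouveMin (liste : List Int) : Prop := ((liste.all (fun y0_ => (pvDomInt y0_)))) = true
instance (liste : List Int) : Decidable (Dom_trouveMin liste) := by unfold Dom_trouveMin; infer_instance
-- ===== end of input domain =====

-- B replaces A's running-min/index tracking loop with builtin min() plus list.index() (idiomatic; same cost).


-- ===== PORT A =====
-- A: running minimum and its index, scanning indices 1..len-1
def trouveMin (liste : List Int) : Int :=
  let min0 := PySem.List.pyGetD liste 0 0
  let st := (PySem.List.pyRange 1 (liste.length : Int) 1).foldl
    (fun (s : Int × Int) i =>
      let x := PySem.List.pyGetD liste i 0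
      if x < s.1 then (x, i) else s) (min0, 0)
  st.2

-- ===== PORT B =====
-- B: return liste.index(min(liste))  (the type-validation loop of Source B is vacuous on List Int)
def trouveMin_alt (liste : List Int) : Int :=
  match PySem.List.min? liste (fun y => y) with
  | some m => ((PySem.List.index? liste m).getD 0 : Nat)
  | none => 0

-- ===== PRECONDITION & SPEC =====
-- Pre_ excludes only the empty list, on which both Pythons raise IndexError at the initial element access.
def Pre_trouveMin (liste : List Int) : Prop := liste ≠ []
instance (liste : List Int) : Decidable (Pre_trouveMin liste) := by unfold Pre_trouveMin; infer_instance
def pvWitness_trouveMin : List Int := [3, 1, 2]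
def Spec_trouveMin (liste : List Int) (out : Int) : Prop := out = trouveMin_alt liste
instance (liste : List Int) (out : Int) : Decidable (Spec_trouveMin liste out) := by unfold Spec_trouveMin; infer_instance

-- ===== CLAIM (what is proved, stated in full; the proofs are below) =====
def Claim_equal_trouveMin : Prop := ∀ (liste : List Int), Dom_trouveMin liste → Pre_trouveMin liste → Spec_trouveMin liste (trouveMin liste)

-- ===== LEMMAS AND PROOFS =====

-- reference recursion for A's loop: state (m, ind), position i, remaining elements
def amin : List Int → Int → Int → Int → Int × Int
  | [], m, ind, _ => (m, ind)
  | x :: xs, m, ind, i => if x < m then amin xs x i (i + 1) else amin xs m ind (i + 1)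

-- A's index fold over range(off, len) equals amin on the suffix l.drop off
theorem fold_eq_amin (xs : List Int) : ∀ (l : List Int) (off : Nat), l.drop off = xs →
    ∀ (m ind : Int),
    (PySem.List.pyRange (off : Int) (l.length : Int) 1).foldl
      (fun (s : Int × Int) i =>
        let x := PySem.List.pyGetD l i 0
        if x < s.1 then (x, i) else s) (m, ind)
    = amin xs m ind (off : Int) := by
  induction xs with
  | nil =>
    intro l off h m ind
    have hle : l.length ≤ off := List.drop_eq_nil_iff.mp h
    rw [PySem.List.pyRange_one_eq_nil (by exact_mod_cast hle)]
    simp [amin]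
  | cons x xs ih =>
    intro l off h m ind
    have hlt : off < l.length := by
      by_contra hc
      rw [List.drop_eq_nil_of_le (by omega)] at h
      simp at h
    have hget : l[off]? = some x := by
      have h0 := List.getElem?_drop (xs := l) (i := off) (j := 0)
      rw [h] at h0
      simpa using h0.symm
    have hx : PySem.List.pyGetD l (off : Int) 0 = x := by
      rw [PySem.List.pyGetD_of_nonneg _ _ (by positivity)]
      simp [List.getD, hget]
    have hdrop : l.drop (off + 1) = xs := by
      have h2 : l.drop (off + 1) = (l.drop off).drop 1 := by rw [List.drop_drop]
      rw [h2, h]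
      rfl
    have hcast : (off : Int) + 1 = ((off + 1 : Nat) : Int) := by push_cast; ring
    rw [PySem.List.pyRange_one_cons (by exact_mod_cast hlt)]
    simp only [List.foldl_cons, hx]
    by_cases hc : x < m
    · rw [if_pos hc, hcast, ih l (off + 1) hdrop x (off : Int)]
      rw [amin, if_pos hc, hcast]
    · rw [if_neg hc, hcast, ih l (off + 1) hdrop m ind]
      rw [amin, if_neg hc, hcast]

theorem min?_append_singleton {p : List Int} {m x : Int}
    (hm : PySem.List.min? p (fun y => y) = some m) :
    PySem.List.min? (p ++ [x]) (fun y => y) = some (min m x) := by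
  cases p with
  | nil => simp [PySem.List.min?] at hm
  | cons h t =>
    rw [PySem.List.min?_id_cons] at hm
    have hm' : t.foldl min h = m := by injection hm
    rw [List.cons_append, PySem.List.min?_id_cons, List.foldl_append]
    simp [hm']

-- invariant: m is the minimum of the prefix p and ind its first index; the loop extends this to p ++ xs
theorem amin_spec (xs : List Int) : ∀ (p : List Int) (m : Int) (ind : Nat),
    PySem.List.min? p (fun y => y) = some m →
    PySem.List.index? p m = some ind →
    ∃ (m' : Int) (ind' : Nat),
      PySem.List.min? (p ++ xs) (fun y => y) = some m' ∧
      PySem.List.index? (p ++ xs) m' = some ind' ∧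
      (amin xs m (ind : Int) (p.length : Int)).2 = (ind' : Int) := by
  induction xs with
  | nil =>
    intro p m ind hm hi
    exact ⟨m, ind, by simpa using hm, by simpa using hi, rfl⟩
  | cons x xs ih =>
    intro p m ind hm hi
    have hmin : ∀ y ∈ p, m ≤ y := by
      intro y hy
      exact PySem.List.min?_isMin hm y hy
    have hassoc : p ++ x :: xs = (p ++ [x]) ++ xs := by simp
    by_cases hc : x < m
    · -- new minimum x at index p.length
      have hnotmem : x ∉ p := by
        intro hx
        exact absurd (hmin x hx) (by omega)
      have hm' : PySem.List.min? (p ++ [x]) (fun y => y) = some x := by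
        rw [min?_append_singleton hm]
        congr 1
        omega
      have hi' : PySem.List.index? (p ++ [x]) x = some p.length :=
        PySem.List.index?_append_singleton_self p x hnotmem
      obtain ⟨m', ind', h1, h2, h3⟩ := ih (p ++ [x]) x p.length hm' hi'
      refine ⟨m', ind', by rwa [hassoc], by rwa [hassoc], ?_⟩
      rw [amin, if_pos hc, ← h3]
      congr 1
      simp
    · -- minimum unchanged
      have hmem : m ∈ p := PySem.List.min?_mem hm
      have hm' : PySem.List.min? (p ++ [x]) (fun y => y) = some m := by
        rw [min?_append_singleton hm]
        congr 1
        omega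
      have hi' : PySem.List.index? (p ++ [x]) m = some ind := by
        rw [PySem.List.index?_append_of_mem [x] hmem]
        exact hi
      obtain ⟨m', ind', h1, h2, h3⟩ := ih (p ++ [x]) m ind hm' hi'
      refine ⟨m', ind', by rwa [hassoc], by rwa [hassoc], ?_⟩
      rw [amin, if_neg hc, ← h3]
      congr 1
      simp

-- ===== VERDICT (by name: the statement is the Claim_ definition above) =====
theorem trouveMin_spec : Claim_equal_trouveMin := by
  intro liste _ hpre
  unfold Spec_trouveMin
  cases liste with
  | nil => exact absurd rfl hpre
  | cons h t =>
    have hdrop : (h :: t).drop 1 = t := rfl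
    have hm0 : PySem.List.pyGetD (h :: t) 0 0 = h := by
      simp [PySem.List.pyGetD, PySem.List.pyGet?, PySem.List.pyIdx?]
    have hfold := fold_eq_amin t (h :: t) 1 hdrop h 0
    simp only [Nat.cast_one] at hfold
    have hm : PySem.List.min? [h] (fun y => y) = some h := by
      rw [PySem.List.min?_id_cons]
      simp
    have hi : PySem.List.index? [h] h = some 0 := PySem.List.index?_cons_self h []
    obtain ⟨m', ind', h1, h2, h3⟩ := amin_spec t [h] h 0 hm hi
    have hlist : [h] ++ t = h :: t := rfl
    rw [hlist] at h1 h2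
    norm_num at h3
    unfold trouveMin trouveMin_alt
    simp only [hm0]
    rw [hfold, h1]
    simp only [h2, h3, Option.getD_some]
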